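-- pv_equiv track=rewrite | github.com/patrickpcodes/advent-of-code | 2015/19/day19.py | get_replacements
-- ===== SOURCE A (Python) =====
-- def get_replacements(input, output, data):
--     new_strings = []
--     start = 0
--     s = data
--     while True:
--         i = s.find(input, start)
--         if i == -1:
--             break
--         # replace JUST this one occurrence
--         s = s[:i] + output + s[i + len(input):]
--
--         new_strings.append(s)
--         start = i + 1
--         s = data
--
--     return new_strings
-- ===== SOURCE B (Python) =====
-- def get_replacements(input, output, data):
--     m = len(input)
--     return [data[:i] + output + data[i + m:]
--             for i in range(len(data) + 1)
--             if data[i:].startswith(input)]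
-- ===== Notes on version B (the rewrite author's own statement) =====
-- stated objective: idiomatic
-- what changed: B replaces A's stateful while-loop of repeated s.find(input, start) calls with a single list comprehension over all positions i in range(len(data)+1), keeping i when data[i:] starts with input and building data[:i]+output+data[i+m:] directly.
import Mathlib
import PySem

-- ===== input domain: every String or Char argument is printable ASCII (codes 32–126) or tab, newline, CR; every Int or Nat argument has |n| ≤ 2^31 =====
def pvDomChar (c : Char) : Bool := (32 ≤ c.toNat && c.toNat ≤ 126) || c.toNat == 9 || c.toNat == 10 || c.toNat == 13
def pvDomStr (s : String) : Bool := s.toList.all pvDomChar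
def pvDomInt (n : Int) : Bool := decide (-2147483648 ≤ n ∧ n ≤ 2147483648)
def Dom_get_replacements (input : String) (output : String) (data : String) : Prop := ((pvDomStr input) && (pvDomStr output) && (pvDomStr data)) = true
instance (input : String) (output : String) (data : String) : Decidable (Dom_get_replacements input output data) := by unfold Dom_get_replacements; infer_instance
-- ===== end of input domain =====

-- B replaces A's stateful while-loop of repeated find calls by one comprehension over
-- all positions testing a startswith; same strings in the same order (idiomatic, not faster).

-- ===== PORT A =====
-- termination fact for A's while-loop: a successful find lies between start and len(data)
theorem pvFindFromBounds (data input : List Char) (start : Nat)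
    (h : PySem.Chars.findFrom data input (start : Int) none ≠ -1) :
    start ≤ data.length ∧ start ≤ (PySem.Chars.findFrom data input (start : Int) none).toNat ∧
      (PySem.Chars.findFrom data input (start : Int) none).toNat ≤ data.length := by
  have hle : start ≤ data.length := by
    by_contra hgt
    apply h
    simp only [PySem.Chars.findFrom]
    split_ifs with h1 h2 <;> omega
  obtain ⟨h1, h2, h3⟩ := PySem.Chars.findFrom_natCast_spec data input start hle h
  have hge : start ≤ (PySem.Chars.findFrom data input (start : Int) none).toNat := by omega
  refine ⟨hle, hge, ?_⟩
  by_contra hbig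
  have hdrop : data.drop (PySem.Chars.findFrom data input (start : Int) none).toNat = [] := by
    apply List.drop_eq_nil_of_le; omega
  rw [hdrop] at h2
  have hnil : input = [] := List.prefix_nil.mp h2
  subst hnil
  exact absurd (h3 start le_rfl (by omega)) (by simp)

-- while True: i = s.find(input, start); if i == -1: break; append s[:i]+output+s[i+len(input):]; start = i+1
def pvGoA (input output data : List Char) (start : Nat) : List String :=
  let i := PySem.Chars.findFrom data input (start : Int) none
  if h : i = -1 then []
  else
    String.ofList (PySem.Chars.slice data none (some i) ++ output ++
               PySem.Chars.slice data (some (i + (input.length : Int))) none)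
      :: pvGoA input output data (i.toNat + 1)
termination_by data.length + 1 - start
decreasing_by
  have := pvFindFromBounds data input start h
  omega

def get_replacements (input : String) (output : String) (data : String) : List String :=
  pvGoA input.toList output.toList data.toList 0

-- ===== PORT B =====
-- [data[:i] + output + data[i+m:] for i in range(len(data)+1) if data[i:].startswith(input)]
def get_replacements_alt (input : String) (output : String) (data : String) : List String :=
  (List.range (data.toList.length + 1)).filterMap (fun (i : Nat) =>
    if PySem.Chars.startswith (PySem.Chars.slice data.toList (some (i : Int)) none) input.toList then
      some (String.ofList (PySem.Chars.slice data.toList none (some (i : Int)) ++ output.toList ++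
                       PySem.Chars.slice data.toList (some ((i : Int) + (input.toList.length : Int))) none))
    else none)

-- ===== PRECONDITION & SPEC =====
def Spec_get_replacements (input : String) (output : String) (data : String) (out : List String) : Prop := out = get_replacements_alt input output data
instance (input : String) (output : String) (data : String) (out : List String) : Decidable (Spec_get_replacements input output data out) := by unfold Spec_get_replacements; infer_instance

-- ===== CLAIM (what is proved, stated in full; the proofs are below) =====
def Claim_equal_get_replacements : Prop := ∀ (input : String) (output : String) (data : String), Dom_get_replacements input output data → Spec_get_replacements input output data (get_replacements input output data)

-- ===== LEMMAS AND PROOFS =====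

-- the comprehension body of B, with natural-number slices already simplified
def pvF (input output data : List Char) (j : Nat) : Option String :=
  if PySem.Chars.startswith (data.drop j) input then
    some (String.ofList (data.take j ++ output ++ data.drop (j + input.length)))
  else none

theorem pvF_eq_none (input output data : List Char) (j : Nat)
    (h : ¬ input <+: data.drop j) : pvF input output data j = none := by
  simp [pvF, PySem.Chars.startswith_iff, h]

-- a prefix of some drop of (drop start data), at position j ≥ start, is an infix of drop start data
theorem pvPrefix_drop_infix (input data : List Char) (start j : Nat) (hsj : start ≤ j)
    (h : input <+: data.drop j) : input <:+: data.drop start := by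
  have : data.drop j = (data.drop start).drop (j - start) := by
    rw [List.drop_drop]; congr 1; omega
  rw [this] at h
  rw [← PySem.Chars.isIn_iff_infix, ← PySem.Chars.exists_prefix_drop_iff_isIn]
  exact ⟨j - start, h⟩

-- A's loop from start computes B's comprehension restricted to positions ≥ start
theorem pvGoA_eq (input output data : List Char) :
    ∀ (n start : Nat), data.length + 1 - start ≤ n →
      pvGoA input output data start =
        (List.range' start (data.length + 1 - start)).filterMap (pvF input output data) := by
  intro n
  induction n with
  | zero =>
      intro start hn
      have hfind : PySem.Chars.findFrom data input (start : Int) none = -1 := by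
        by_contra h
        have := pvFindFromBounds data input start h
        omega
      rw [pvGoA]
      simp [hfind, show data.length + 1 - start = 0 by omega]
  | succ n ih =>
      intro start _
      by_cases hs : start ≤ data.length
      · by_cases hfind : PySem.Chars.findFrom data input (start : Int) none = -1
        · -- no occurrence at or after start: every position j ≥ start fails the test
          have hno : ¬ input <:+: data.drop start :=
            (PySem.Chars.findFrom_natCast_eq_neg_one_iff data input start hs).mp hfind
          rw [pvGoA]
          simp only [hfind, dite_true]
          symm
          rw [List.filterMap_eq_nil_iff]
          intro j hj
          have hj' := List.mem_range'_1.mp hj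
          exact pvF_eq_none input output data j (fun hpre =>
            hno (pvPrefix_drop_infix input data start j hj'.1 hpre))
        · obtain ⟨hsle, hge, hle⟩ := pvFindFromBounds data input start hfind
          obtain ⟨hsti, hpre, hmin⟩ := PySem.Chars.findFrom_natCast_spec data input start hs hfind
          set i := PySem.Chars.findFrom data input (start : Int) none with hi
          have hinn : (0:Int) ≤ i := le_trans (Int.natCast_nonneg start) hsti
          -- split the range at the found position i.toNat
          have hsplit : List.range' start (data.length + 1 - start) =
              List.range' start (i.toNat - start) ++
                (i.toNat :: List.range' (i.toNat + 1) (data.length - i.toNat)) := by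
            have h1 : data.length + 1 - start = (i.toNat - start) + (data.length - i.toNat + 1) := by
              omega
            have h2 : start + 1 * (i.toNat - start) = i.toNat := by omega
            rw [h1, ← List.range'_append (step := 1), h2, List.range'_succ]
          have hnil : (List.range' start (i.toNat - start)).filterMap (pvF input output data) = [] := by
            rw [List.filterMap_eq_nil_iff]
            intro j hj
            have hj' := List.mem_range'_1.mp hj
            exact pvF_eq_none input output data j (hmin j hj'.1 (by omega))
          have hfi : pvF input output data i.toNat =
              some (String.ofList (data.take i.toNat ++ output ++ data.drop (i.toNat + input.length))) := by
            simp [pvF, PySem.Chars.startswith_iff, hpre]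
          rw [hsplit, List.filterMap_append, hnil, List.nil_append, List.filterMap_cons, hfi]
          rw [pvGoA]
          simp only [← hi, dif_neg hfind]
          congr 1
          · -- the built strings agree: slices reduce to take/drop at a nonnegative index
            rw [← Int.toNat_of_nonneg hinn]
            rw [show ((i.toNat : Nat) : Int) + (input.length : Int) =
                  ((i.toNat + input.length : Nat) : Int) by push_cast; ring]
            simp only [PySem.Chars.slice_eq_listSlice]
            rw [PySem.List.slice_to_natCast, PySem.List.slice_from_natCast, Int.toNat_natCast]
          · rw [ih (i.toNat + 1) (by omega)]
            congr 2
            omega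
      · have hfind : PySem.Chars.findFrom data input (start : Int) none = -1 := by
          by_contra h
          have := pvFindFromBounds data input start h
          omega
        rw [pvGoA]
        simp [hfind, show data.length + 1 - start = 0 by omega]

-- ===== VERDICT (by name: the statement is the Claim_ definition above) =====
theorem get_replacements_spec : Claim_equal_get_replacements := by
  intro input output data _
  unfold Spec_get_replacements get_replacements get_replacements_alt
  rw [pvGoA_eq input.toList output.toList data.toList (data.toList.length + 1) 0 (by omega)]
  simp only [Nat.sub_zero]
  rw [← List.range_eq_range']
  apply List.filterMap_congr
  intro j hj
  simp only [pvF]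
  simp only [PySem.Chars.slice_eq_listSlice]
  rw [show ((j : Nat) : Int) + ((input.toList.length : Nat) : Int) =
        ((j + input.toList.length : Nat) : Int) by push_cast; ring]
  rw [PySem.List.slice_from_natCast, PySem.List.slice_to_natCast, PySem.List.slice_from_natCast]
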